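-- pv_equiv track=rewrite | github.com/Mutagenic/text-modifiers-project | text_modifier.py | pascalize
-- ===== SOURCE A (Python) =====
-- def pascalize(text):
--     """Pascalizes a given text removing _ and space"""
--     text = text.strip()
--
--     edited_text = text.replace("_", " ")
--     words_list = edited_text.split(" ")
--     new_text = []
--     for word in words_list:
--         if not word:
--             continue
--
--         titlecase = word[0].upper()
--         new_text.append(titlecase + word[1:])
--
--     return "".join(new_text)
-- ===== SOURCE B (Python) =====
-- def pascalize(text):
--     """Pascalizes a given text removing _ and space"""
--     text = text.strip()
--     result = []
--     at_word_start = True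
--     for c in text:
--         if c == '_' or c == ' ':
--             at_word_start = True
--         else:
--             result.append(c.upper() if at_word_start else c)
--             at_word_start = False
--     return ''.join(result)
-- ===== Notes on version B (the rewrite author's own statement) =====
-- stated objective: simpler
-- what changed: Replaced A's replace-underscores/split-on-space/capitalize-each-word/join pipeline by a single character pass over the stripped text with an at-word-start flag, building the output directly with no intermediate word list.
import Mathlib
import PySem

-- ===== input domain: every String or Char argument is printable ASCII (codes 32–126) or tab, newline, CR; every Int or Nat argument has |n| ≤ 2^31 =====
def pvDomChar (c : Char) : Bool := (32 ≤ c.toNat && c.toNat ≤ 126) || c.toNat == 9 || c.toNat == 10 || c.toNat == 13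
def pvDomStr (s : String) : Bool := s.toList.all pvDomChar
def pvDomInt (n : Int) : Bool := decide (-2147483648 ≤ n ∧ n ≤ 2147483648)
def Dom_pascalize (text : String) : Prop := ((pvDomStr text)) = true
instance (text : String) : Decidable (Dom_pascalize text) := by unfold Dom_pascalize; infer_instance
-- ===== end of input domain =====

-- B replaces A's replace/split/join word-list decomposition by a single character pass
-- with an at-word-start flag (objective: simpler, no intermediate word list).

-- ===== PORT A =====
-- literal port of A: strip, replace '_'→' ', split on ' ', loop appending capitalized words, join
def pascalize (text : String) : String :=
  let t := PySem.Chars.strip text.toList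
  let edited := PySem.Chars.replace t ['_'] [' ']
  let wordsList := PySem.Chars.splitOn edited [' ']
  let newText := wordsList.foldl
    (fun acc word =>
      match word with
      | [] => acc                                   -- if not word: continue
      | c :: rest => acc ++ [PySem.Chars.upperChar c :: rest])  -- word[0].upper() + word[1:]
    []
  String.mk (PySem.Chars.join [] newText)

-- ===== PORT B =====
-- literal port of B: strip, then one fold over the characters with an at-word-start flag
def pascalize_alt (text : String) : String :=
  let t := PySem.Chars.strip text.toList
  let st := t.foldl
    (fun (st : List Char × Bool) c =>
      if c = '_' ∨ c = ' ' then (st.1, true)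
      else (st.1 ++ [if st.2 then PySem.Chars.upperChar c else c], false))
    ([], true)
  String.mk st.1

-- ===== PRECONDITION & SPEC =====
def Spec_pascalize (text : String) (out : String) : Prop := out = pascalize_alt text
instance (text : String) (out : String) : Decidable (Spec_pascalize text out) := by unfold Spec_pascalize; infer_instance

-- ===== CLAIM (what is proved, stated in full; the proofs are below) =====
def Claim_equal_pascalize : Prop := ∀ (text : String), Dom_pascalize text → Spec_pascalize text (pascalize text)

-- ===== LEMMAS AND PROOFS =====

-- substitution performed by A's replace("_", " ")
def pvSub (c : Char) : Char := if c = '_' then ' ' else c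

-- B's state machine ('_' and ' ' are delimiters), recursively
def pvG (flag : Bool) : List Char → List Char
  | [] => []
  | c :: cs =>
    if c = '_' ∨ c = ' ' then pvG true cs
    else (if flag then PySem.Chars.upperChar c else c) :: pvG false cs

-- the same machine with only ' ' as delimiter (runs on the substituted text)
def pvG2 (flag : Bool) : List Char → List Char
  | [] => []
  | c :: cs =>
    if c = ' ' then pvG2 true cs
    else (if flag then PySem.Chars.upperChar c else c) :: pvG2 false cs

lemma pv_replace_go (fuel : Nat) (l acc : List Char) (h : l.length ≤ fuel) :
    PySem.Chars.replace.go ['_'] [' '] fuel l acc = acc.reverse ++ l.map pvSub := by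
  induction fuel generalizing l acc with
  | zero =>
    match l with
    | [] => simp [PySem.Chars.replace.go]
    | c :: t => simp at h
  | succ fuel ih =>
    match l with
    | [] => simp [PySem.Chars.replace.go]
    | c :: t =>
      rw [PySem.Chars.replace.go]
      by_cases hc : c = '_'
      · subst hc
        simp only [List.isPrefixOf, beq_self_eq_true, Bool.and_self, if_pos]
        simp only [List.length_cons, List.length_nil, List.drop_succ_cons, List.drop_zero,
          List.reverse_cons, List.reverse_nil, List.nil_append, List.singleton_append]
        rw [ih t (' ' :: acc) (by simpa using Nat.le_of_succ_le_succ h)]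
        simp [pvSub]
      · have hp : (['_'].isPrefixOf (c :: t)) = false := by
          simp [List.isPrefixOf]; exact fun hh => absurd hh.symm hc
        rw [hp]
        simp only [Bool.false_eq_true, if_neg, not_false_eq_true]
        rw [ih t (c :: acc) (by simpa using Nat.le_of_succ_le_succ h)]
        simp [pvSub, hc]

lemma pv_replace (l : List Char) :
    PySem.Chars.replace l ['_'] [' '] = l.map pvSub := by
  rw [PySem.Chars.replace]
  simp only [List.isEmpty_cons, Bool.false_eq_true, if_neg, not_false_eq_true]
  exact pv_replace_go _ l [] le_rfl

lemma pv_modifyHead_id {α : Type} (l : List α) : List.modifyHead (fun x => x) l = l := by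
  cases l <;> simp

lemma pv_intercalate_nil (ws : List (List Char)) : List.intercalate [] ws = ws.flatten := by
  induction ws with
  | nil => rfl
  | cons w ws ih =>
    cases ws with
    | nil => simp [List.intercalate]
    | cons w' ws' =>
      simp only [List.intercalate, List.intersperse_cons₂, List.flatten_cons] at ih ⊢
      simp [ih]

lemma pv_splitOn_go (fuel : Nat) (l cur : List Char) (acc : List (List Char)) (h : l.length < fuel) :
    PySem.Chars.splitOn.go [' '] fuel l cur acc
      = acc.reverse ++ List.modifyHead (cur.reverse ++ ·) (List.splitOnP (· == ' ') l) := by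
  induction fuel generalizing l cur acc with
  | zero => omega
  | succ fuel ih =>
    match l with
    | [] => simp [PySem.Chars.splitOn.go, List.splitOnP_nil]
    | c :: t =>
      rw [PySem.Chars.splitOn.go]
      by_cases hc : c = ' '
      · subst hc
        simp only [List.isPrefixOf, beq_self_eq_true, Bool.and_self, if_pos]
        simp only [List.length_cons, List.length_nil, List.drop_succ_cons, List.drop_zero]
        rw [ih t [] (cur.reverse :: acc) (by simpa using Nat.lt_of_succ_lt_succ h)]
        simp [List.splitOnP_cons, pv_modifyHead_id]
      · have hp : ([' '].isPrefixOf (c :: t)) = false := by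
          simp [List.isPrefixOf]; exact fun hh => absurd hh.symm hc
        rw [hp]
        simp only [Bool.false_eq_true, if_neg, not_false_eq_true]
        rw [ih t (c :: cur) acc (by simpa using Nat.lt_of_succ_lt_succ h)]
        simp [List.splitOnP_cons, hc, List.modifyHead_modifyHead, Function.comp_def]

lemma pv_splitOn (l : List Char) :
    PySem.Chars.splitOn l [' '] = List.splitOnP (· == ' ') l := by
  rw [PySem.Chars.splitOn, pv_splitOn_go _ l [] [] (Nat.lt_succ_self _)]
  simp [pv_modifyHead_id]

-- A's word loop is a filterMap
def pvTF (w : List Char) : Option (List Char) :=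
  match w with
  | [] => none
  | c :: rest => some (PySem.Chars.upperChar c :: rest)

lemma pv_foldl_words (ws : List (List Char)) (a : List (List Char)) :
    ws.foldl
      (fun acc word =>
        match word with
        | [] => acc
        | c :: rest => acc ++ [PySem.Chars.upperChar c :: rest]) a
      = a ++ ws.filterMap pvTF := by
  induction ws generalizing a with
  | nil => simp
  | cons w ws ih =>
    match w with
    | [] => simp [List.foldl_cons, ih, pvTF]
    | c :: rest => simp [List.foldl_cons, ih, pvTF]

-- the split/flatten pipeline equals the single-delimiter machine (both head forms)
lemma pv_split_flatten (cs : List Char) :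
    ((List.splitOnP (· == ' ') cs).headI
        ++ ((List.splitOnP (· == ' ') cs).tail.filterMap pvTF).flatten
      = pvG2 false cs)
    ∧ ((List.splitOnP (· == ' ') cs).filterMap pvTF).flatten = pvG2 true cs := by
  induction cs with
  | nil => simp [List.splitOnP_nil, pvG2, pvTF]
  | cons c cs ih =>
    obtain ⟨ih1, ih2⟩ := ih
    by_cases hc : c = ' '
    · subst hc
      simp only [List.splitOnP_cons, beq_self_eq_true, if_pos]
      constructor
      · simpa [pvG2, pvTF] using ih2
      · simpa [pvG2, pvTF] using ih2
    · have hsp : List.splitOnP (· == ' ') cs ≠ [] := List.splitOnP_ne_nil _ cs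
      obtain ⟨w, ws, hw⟩ := List.exists_cons_of_ne_nil hsp
      have hcb : (c == ' ') = false := by simpa using hc
      rw [hw] at ih1 ih2
      simp only [List.headI_cons, List.tail_cons] at ih1
      simp only [List.splitOnP_cons, hcb, Bool.false_eq_true, if_neg, not_false_eq_true, hw,
        List.modifyHead_cons]
      constructor
      · simp only [List.headI_cons, List.tail_cons, List.cons_append, pvG2, hc,
          Bool.false_eq_true, if_false]
        exact congrArg (c :: ·) ih1
      · have hv : pvTF (c :: w) = some (PySem.Chars.upperChar c :: w) := rfl
        simp only [List.filterMap_cons, hv, List.flatten_cons]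
        simp [pvG2, hc, ← ih1]

-- B's machine on the raw text = the single-delimiter machine on the substituted text
lemma pv_G_sub (flag : Bool) (cs : List Char) :
    pvG2 flag (cs.map pvSub) = pvG flag cs := by
  induction cs generalizing flag with
  | nil => rfl
  | cons c cs ih =>
    by_cases hd : c = '_' ∨ c = ' '
    · have : pvSub c = ' ' := by rcases hd with h | h <;> simp [pvSub, h]
      simp [pvG, pvG2, this, hd, ih]
    · rw [not_or] at hd
      have h1 : pvSub c = c := by simp [pvSub, hd.1]
      simp [pvG, pvG2, h1, hd.1, hd.2, ih]

-- B's fold accumulates pvG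
lemma pv_foldl_alt (cs : List Char) (a : List Char) (flag : Bool) :
    (cs.foldl
      (fun (st : List Char × Bool) c =>
        if c = '_' ∨ c = ' ' then (st.1, true)
        else (st.1 ++ [if st.2 then PySem.Chars.upperChar c else c], false))
      (a, flag)).1 = a ++ pvG flag cs := by
  induction cs generalizing a flag with
  | nil => simp [pvG]
  | cons c cs ih =>
    by_cases hd : c = '_' ∨ c = ' '
    · simp [List.foldl_cons, hd, ih, pvG]
    · simp [List.foldl_cons, hd, ih, pvG]

-- ===== VERDICT (by name: the statement is the Claim_ definition above) =====
theorem pascalize_spec : Claim_equal_pascalize := by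
  intro text _
  show String.mk
      (PySem.Chars.join []
        ((PySem.Chars.splitOn
            (PySem.Chars.replace (PySem.Chars.strip text.toList) ['_'] [' ']) [' ']).foldl
          (fun acc word =>
            match word with
            | [] => acc
            | c :: rest => acc ++ [PySem.Chars.upperChar c :: rest])
          []))
    = String.mk
      (((PySem.Chars.strip text.toList).foldl
        (fun (st : List Char × Bool) c =>
          if c = '_' ∨ c = ' ' then (st.1, true)
          else (st.1 ++ [if st.2 then PySem.Chars.upperChar c else c], false))
        ([], true)).1)
  rw [pv_replace, pv_splitOn, pv_foldl_words, pv_foldl_alt]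
  have hA := (pv_split_flatten ((PySem.Chars.strip text.toList).map pvSub)).2
  rw [pv_G_sub] at hA
  simp only [List.nil_append, PySem.Chars.join, pv_intercalate_nil]
  rw [hA]
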